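-- pv_equiv track=rewrite | github.com/OlaMotorola/Python | Zestaw_5/polys.py | eq_poly
-- ===== SOURCE A (Python) =====
-- def eq_poly(poly1, poly2):
--     max_len = max(len(poly1), len(poly2))
--     for i in range(max_len):
--         coef1 = poly1[i] if i < len(poly1) else 0
--         coef2 = poly2[i] if i < len(poly2) else 0
--         if coef1 != coef2:
--             return False
--     return True
-- ===== SOURCE B (Python) =====
-- def _canon_len(p):
--     # length of p with trailing zeros stripped (canonical polynomial length)
--     i = len(p)
--     while i > 0 and p[i - 1] == 0:
--         i -= 1
--     return i
--
-- def eq_poly(poly1, poly2):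
--     # compare canonical forms: each polynomial with trailing zeros removed
--     return poly1[:_canon_len(poly1)] == poly2[:_canon_len(poly2)]
-- ===== Notes on version B (the rewrite author's own statement) =====
-- stated objective: simpler
-- what changed: Instead of A's padded per-index comparison loop over max(len), B normalizes each polynomial independently to its canonical form by stripping trailing zeros and compares the two canonical lists for equality.
import Mathlib
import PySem

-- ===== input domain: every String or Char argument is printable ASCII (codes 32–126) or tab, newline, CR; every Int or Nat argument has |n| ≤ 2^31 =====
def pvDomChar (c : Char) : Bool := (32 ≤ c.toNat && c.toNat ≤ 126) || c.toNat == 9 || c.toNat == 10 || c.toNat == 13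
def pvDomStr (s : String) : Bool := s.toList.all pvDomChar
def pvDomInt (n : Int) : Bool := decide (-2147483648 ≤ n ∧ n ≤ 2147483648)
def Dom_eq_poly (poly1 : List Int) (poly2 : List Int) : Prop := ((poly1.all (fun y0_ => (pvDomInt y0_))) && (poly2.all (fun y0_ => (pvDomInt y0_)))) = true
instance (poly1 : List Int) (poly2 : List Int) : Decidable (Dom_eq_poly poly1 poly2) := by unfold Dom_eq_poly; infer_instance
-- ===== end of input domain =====

-- B compares canonical forms (each list with trailing zeros stripped) instead of A's padded per-index loop (simpler decomposition, same cost).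


-- ===== PORT A =====
-- the loop 'for i in range(max_len)': go i fuel runs the remaining 'fuel' iterations starting at index i.
-- i is always ≥ 0 and guarded by 'i < len', so 'List.getD i 0' is exactly Python's poly[i] here.
def eqPolyGoA (poly1 poly2 : List Int) : Nat → Nat → Bool
  | _, 0 => true
  | i, fuel + 1 =>
    let coef1 : Int := if i < poly1.length then poly1.getD i 0 else 0
    let coef2 : Int := if i < poly2.length then poly2.getD i 0 else 0
    if coef1 ≠ coef2 then false
    else eqPolyGoA poly1 poly2 (i + 1) fuel

def eq_poly (poly1 : List Int) (poly2 : List Int) : Bool :=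
  let max_len := max poly1.length poly2.length
  eqPolyGoA poly1 poly2 0 max_len

-- ===== PORT B =====
-- _canon_len's while loop 'while i > 0 and p[i-1] == 0: i -= 1', transcribed as recursion on i;
-- i-1 is in range whenever i > 0, so 'List.getD (i-1) 0' is exactly Python's p[i-1] here.
def canonLen (p : List Int) : Nat → Nat
  | 0 => 0
  | i + 1 => if p.getD i 0 == 0 then canonLen p i else i + 1

def eq_poly_alt (poly1 : List Int) (poly2 : List Int) : Bool :=
  poly1.take (canonLen poly1 poly1.length) == poly2.take (canonLen poly2 poly2.length)

-- ===== PRECONDITION & SPEC =====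
def Spec_eq_poly (poly1 : List Int) (poly2 : List Int) (out : Bool) : Prop := out = eq_poly_alt poly1 poly2
instance (poly1 : List Int) (poly2 : List Int) (out : Bool) : Decidable (Spec_eq_poly poly1 poly2 out) := by unfold Spec_eq_poly; infer_instance

-- ===== CLAIM (what is proved, stated in full; the proofs are below) =====
def Claim_equal_eq_poly : Prop := ∀ (poly1 : List Int) (poly2 : List Int), Dom_eq_poly poly1 poly2 → Spec_eq_poly poly1 poly2 (eq_poly poly1 poly2)

-- ===== LEMMAS AND PROOFS =====

-- reference version of A: structural padded comparison
def pad : List Int → List Int → Bool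
  | [], [] => true
  | [], b :: bs => b == 0 && pad [] bs
  | a :: as, [] => a == 0 && pad as []
  | a :: as, b :: bs => a == b && pad as bs

-- reference version of B: strip trailing zeros, structurally
def rtz : List Int → List Int
  | [] => []
  | a :: as => if rtz as = [] ∧ a = 0 then [] else a :: rtz as

theorem eqPolyGoA_shift (poly1 poly2 : List Int) (fuel i : Nat) :
    eqPolyGoA poly1 poly2 (i + 1) fuel = eqPolyGoA poly1.tail poly2.tail i fuel := by
  induction fuel generalizing i with
  | zero => rfl
  | succ k ih =>
    cases poly1 <;> cases poly2 <;> simp [eqPolyGoA, ih]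

theorem eqPolyGoA_step (poly1 poly2 : List Int) (k : Nat) :
    eqPolyGoA poly1 poly2 0 (k + 1)
      = (poly1.headD 0 == poly2.headD 0 && eqPolyGoA poly1.tail poly2.tail 0 k) := by
  cases poly1 <;> cases poly2 <;>
    simp [eqPolyGoA, eqPolyGoA_shift _ _ _ 0] <;> tauto

theorem eq_poly_eq_pad (poly1 poly2 : List Int) : eq_poly poly1 poly2 = pad poly1 poly2 := by
  induction poly1 generalizing poly2 with
  | nil =>
    induction poly2 with
    | nil => simp [eq_poly, eqPolyGoA, pad]
    | cons b bs ih =>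
      simp only [eq_poly, List.length_nil, List.length_cons, Nat.zero_max] at *
      rw [eqPolyGoA_step]
      simp only [List.headD_nil, List.headD_cons, List.tail_nil, List.tail_cons]
      rw [ih]
      by_cases hb : b = 0
      · simp [hb, pad]
      · have e1 : ((0:Int) == b) = false := by simpa using fun h : (0:Int) = b => hb h.symm
        have e2 : (b == (0:Int)) = false := by simpa using hb
        simp [e1, e2, pad]
  | cons a as ih =>
    cases poly2 with
    | nil =>
      have h0 := ih []
      simp only [eq_poly, List.length_nil, List.length_cons, Nat.max_zero] at *
      rw [eqPolyGoA_step]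
      simp only [List.headD_nil, List.headD_cons, List.tail_nil, List.tail_cons]
      rw [h0]
      by_cases ha : a = 0 <;> simp [ha, pad]
    | cons b bs =>
      have hb := ih bs
      simp only [eq_poly, List.length_cons, Nat.succ_max_succ] at *
      rw [eqPolyGoA_step]
      simp only [List.headD_cons, List.tail_cons]
      rw [hb]
      by_cases hab : a = b <;> simp [hab, pad]

theorem pad_eq_rtz (poly1 poly2 : List Int) : pad poly1 poly2 = (rtz poly1 == rtz poly2) := by
  induction poly1 generalizing poly2 with
  | nil =>
    induction poly2 with
    | nil => simp [pad, rtz]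
    | cons b bs ih =>
      rw [pad, ih]
      by_cases hbs : rtz bs = [] <;> by_cases hb : b = 0 <;> simp [rtz, hbs, hb]
  | cons a as ih =>
    cases poly2 with
    | nil =>
      have h0 := ih []
      rw [pad, h0]
      by_cases has : rtz as = [] <;> by_cases ha : a = 0 <;> simp [rtz, has, ha]
    | cons b bs =>
      rw [pad, ih bs]
      by_cases has : rtz as = [] <;> by_cases hbs : rtz bs = [] <;>
        by_cases ha : a = 0 <;> by_cases hb : b = 0 <;>
        simp [rtz, has, hbs, ha, hb] <;> omega

theorem canonLen_le (p : List Int) (i : Nat) : canonLen p i ≤ i := by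
  induction i with
  | zero => simp [canonLen]
  | succ k ih =>
    rw [canonLen]
    split
    · exact ih.trans (Nat.le_succ k)
    · exact le_refl _

theorem canonLen_append (as : List Int) (a : Int) (i : Nat) (h : i ≤ as.length) :
    canonLen (as ++ [a]) i = canonLen as i := by
  induction i with
  | zero => rfl
  | succ k ih =>
    have hk : k < as.length := h
    rw [canonLen, canonLen, List.getD_append _ _ _ _ hk, ih (Nat.le_of_lt hk)]

theorem rtz_append (as : List Int) (a : Int) :
    rtz (as ++ [a]) = if a = 0 then rtz as else as ++ [a] := by
  induction as with
  | nil => by_cases ha : a = 0 <;> simp [rtz, ha]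
  | cons b bs ih =>
    by_cases ha : a = 0
    · simp only [ha, if_true] at ih ⊢
      rw [List.cons_append, rtz, ih, rtz]
    · simp only [ha, if_false] at ih ⊢
      rw [List.cons_append, rtz, ih]
      simp

theorem canon_eq_rtz (p : List Int) : p.take (canonLen p p.length) = rtz p := by
  induction p using List.reverseRecOn with
  | nil => rfl
  | append_singleton as a ih =>
    rw [rtz_append]
    have hlen : (as ++ [a]).length = as.length + 1 := by simp
    rw [hlen, canonLen]
    have hget : (as ++ [a]).getD as.length 0 = a := by
      simp [List.getD]
    rw [hget]
    by_cases ha : a = 0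
    · have e0 : (a == (0:Int)) = true := by simp [ha]
      rw [e0, if_pos rfl, if_pos ha, canonLen_append as a as.length (le_refl _),
        List.take_append_of_le_length (canonLen_le as as.length), ih]
    · have e0 : (a == (0:Int)) = false := by simp [ha]
      rw [e0]
      simp [ha, List.take_of_length_le, hlen]

-- ===== VERDICT (by name: the statement is the Claim_ definition above) =====
theorem eq_poly_spec : Claim_equal_eq_poly := by
  intro poly1 poly2 _
  unfold Spec_eq_poly eq_poly_alt
  rw [eq_poly_eq_pad, pad_eq_rtz, canon_eq_rtz, canon_eq_rtz]
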